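-- pv_equiv track=rewrite | github.com/sungyeong98/programmers | 프로그래머스/3/152995. 인사고과/인사고과.py | solution
-- ===== SOURCE A (Python) =====
-- def solution(scores):
--     answer = 1
--     temp,s,sv=scores[0],scores[1:],0
--     for i,j in sorted(s,key=lambda x:(-x[0],x[1])):
--         if temp[0]<i and temp[1]<j:
--             return -1
--         if sv<=j:
--             sv=j
--             if temp[0]+temp[1]<i+j:
--                 answer+=1
--     return answer
-- ===== SOURCE B (Python) =====
-- def solution(scores):
--     w = scores[0]
--     others = scores[1:]
--     if any(w[0] < a and w[1] < b for a, b in others):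
--         return -1
--     ws = w[0] + w[1]
--     answer = 1
--     for i, j in others:
--         m = max([0] + [b for a, b in others if a > i])
--         if m <= j and ws < i + j:
--             answer += 1
--     return answer
-- ===== Notes on version B (the rewrite author's own statement) =====
-- stated objective: alternative
-- what changed: Replaced A's sort + single running-max sweep with a sort-free double scan: Wanho is excluded iff some competitor strictly dominates him, and each competitor is counted iff its second score is at least the max (floored at 0, as A's sv is) of the second scores of all rows with a strictly larger first score; the sorted order and the sv state machine disappear.
-- outside the precondition, e.g. on solution([[5]]): A returns 1, B raises IndexError
import Mathlib
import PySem

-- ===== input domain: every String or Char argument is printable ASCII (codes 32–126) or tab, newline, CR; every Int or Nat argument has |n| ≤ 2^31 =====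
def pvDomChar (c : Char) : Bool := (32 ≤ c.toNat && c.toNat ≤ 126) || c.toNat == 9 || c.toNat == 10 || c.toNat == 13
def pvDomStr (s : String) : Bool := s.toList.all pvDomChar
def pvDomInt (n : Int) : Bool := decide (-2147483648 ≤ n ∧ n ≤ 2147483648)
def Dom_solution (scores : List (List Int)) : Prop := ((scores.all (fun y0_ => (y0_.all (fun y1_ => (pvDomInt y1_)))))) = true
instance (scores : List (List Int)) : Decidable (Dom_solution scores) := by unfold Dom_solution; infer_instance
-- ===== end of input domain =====

-- B is an alternative, sort-free O(n²) re-implementation (repeated scans instead of A's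
-- sort + running-max pass); equivalence is about the return value only (neither mutates its input).

-- x[0] and x[1] of a length-2 score pair (shared spelling of the Python subscripts)
def pvI (x : List Int) : Int := PySem.List.pyGetD x 0 0
def pvJ (x : List Int) : Int := PySem.List.pyGetD x 1 0

-- ===== PORT A =====
-- the 'for i,j in sorted(...)' loop of A: state = (remaining list, sv, answer)
def pvLoopA (temp : List Int) : List (List Int) → Int → Int → Int
  | [], _, answer => answer
  | x :: rest, sv, answer =>
    if pvI temp < pvI x ∧ pvJ temp < pvJ x then -1
    else if sv ≤ pvJ x then
      pvLoopA temp rest (pvJ x) (if pvI temp + pvJ temp < pvI x + pvJ x then answer + 1 else answer)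
    else pvLoopA temp rest sv answer

def solution (scores : List (List Int)) : Int :=
  let answer : Int := 1
  let temp := PySem.List.pyGetD scores 0 []
  let s := PySem.List.slice scores (some 1) none
  let sv : Int := 0
  pvLoopA temp (PySem.List.sorted2 s (fun x => -(pvI x)) (fun x => pvJ x)) sv answer

-- ===== PORT B =====
def solution_alt (scores : List (List Int)) : Int :=
  let w := PySem.List.pyGetD scores 0 []
  let others := PySem.List.slice scores (some 1) none
  if others.any (fun x => decide (pvI w < pvI x) && decide (pvJ w < pvJ x)) then -1
  else
    others.foldl (fun answer x =>
      let i := pvI x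
      let j := pvJ x
      -- m = max([0] + [b for a, b in others if a > i])  (running max; cf. PySem.List.max?_id_cons)
      let m := ((others.filter (fun y => decide (i < pvI y))).map (fun y => pvJ y)).foldl max 0
      if m ≤ j ∧ pvI w + pvJ w < i + j then answer + 1 else answer) 1

-- ===== PRECONDITION & SPEC =====
-- Pre_ excludes the inputs where Python A raises (empty list; a competitor row whose length is
-- not 2, on which the 'for i,j in …' unpacking / sort key raises; a first row shorter than 2 with
-- competitors present, where temp[0]/temp[1] raises) and, in addition, a first row shorter than 2
-- with NO competitors: there A happens to return 1 without ever reading Wanho's scores, while B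
-- reads them up front and itself raises IndexError.
def Pre_solution (scores : List (List Int)) : Prop :=
  scores ≠ [] ∧ 2 ≤ (scores.headD []).length ∧ ∀ x ∈ scores.tail, x.length = 2
instance (scores : List (List Int)) : Decidable (Pre_solution scores) := by unfold Pre_solution; infer_instance
def pvWitness_solution : List (List Int) := [[2, 2], [1, 4], [3, 2], [3, 3]]

def Spec_solution (scores : List (List Int)) (out : Int) : Prop := out = solution_alt scores
instance (scores : List (List Int)) (out : Int) : Decidable (Spec_solution scores out) := by unfold Spec_solution; infer_instance

-- ===== CLAIM (what is proved, stated in full; the proofs are below) =====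
def Claim_equal_solution : Prop := ∀ (scores : List (List Int)), Dom_solution scores → Pre_solution scores → Spec_solution scores (solution scores)

-- ===== LEMMAS AND PROOFS =====

-- the strict comparison sorted2 uses with keys (-x[0], x[1]), written out
def pvLt (a b : List Int) : Bool :=
  decide (-(pvI a) < -(pvI b)) || (!decide (-(pvI b) < -(pvI a)) && decide (pvJ a < pvJ b))

-- the corresponding non-strict order: key a ≤lex key b
def pvRle (a b : List Int) : Prop := pvI b < pvI a ∨ (pvI a = pvI b ∧ pvJ a ≤ pvJ b)

-- "x is on the Pareto front of F (with A's sv ≥ 0 floor)"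
def pvQ (F : List (List Int)) (x : List Int) : Bool :=
  decide (0 ≤ pvJ x) && F.all (fun y => decide (pvJ y ≤ pvJ x) || decide (pvI y ≤ pvI x))

-- count of the counted rows: on-front (wrt F) and sum strictly above w's
def pvCountQ (F : List (List Int)) (w : List Int) : List (List Int) → Int
  | [] => 0
  | x :: r => (if pvQ F x && decide (pvI w + pvJ w < pvI x + pvJ x) then (1 : Int) else 0) + pvCountQ F w r

-- A's loop restated without the early return / answer accumulator
def pvCountA (temp : List Int) : List (List Int) → Int → Int
  | [], _ => 0
  | x :: r, sv =>
    if sv ≤ pvJ x then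
      (if pvI temp + pvJ temp < pvI x + pvJ x then (1 : Int) else 0) + pvCountA temp r (pvJ x)
    else pvCountA temp r sv

theorem pvLoopA_neg1 (temp : List Int) :
    ∀ (L : List (List Int)) (sv answer : Int),
      (∃ x ∈ L, pvI temp < pvI x ∧ pvJ temp < pvJ x) → pvLoopA temp L sv answer = -1 := by
  intro L
  induction L with
  | nil => intro sv ans h; simp at h
  | cons x rest ih =>
    intro sv ans h
    simp only [pvLoopA]
    by_cases hx : pvI temp < pvI x ∧ pvJ temp < pvJ x
    · rw [if_pos hx]
    · rw [if_neg hx]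
      obtain ⟨y, hy, hb⟩ := h
      rcases List.mem_cons.mp hy with rfl | hy2
      · exact absurd hb hx
      · split <;> exact ih _ _ ⟨y, hy2, hb⟩

theorem pvLoopA_count (temp : List Int) :
    ∀ (L : List (List Int)) (sv answer : Int),
      (∀ x ∈ L, ¬(pvI temp < pvI x ∧ pvJ temp < pvJ x)) →
      pvLoopA temp L sv answer = answer + pvCountA temp L sv := by
  intro L
  induction L with
  | nil => intro sv ans _; simp [pvLoopA, pvCountA]
  | cons x rest ih =>
    intro sv ans h
    have hx := h x (List.mem_cons_self)
    have h2 : ∀ y ∈ rest, ¬(pvI temp < pvI y ∧ pvJ temp < pvJ y) :=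
      fun y hy => h y (List.mem_cons_of_mem _ hy)
    simp only [pvLoopA, pvCountA, if_neg hx]
    by_cases hsv : sv ≤ pvJ x
    · rw [if_pos hsv, if_pos hsv, ih _ _ h2]
      split <;> ring
    · rw [if_neg hsv, if_neg hsv, ih _ _ h2]

theorem pvLt_true {a b : List Int} :
    pvLt a b = true ↔ (pvI b < pvI a ∨ (pvI a = pvI b ∧ pvJ a < pvJ b)) := by
  simp only [pvLt, Bool.or_eq_true, Bool.and_eq_true, Bool.not_eq_true', decide_eq_true_eq,
    decide_eq_false_iff_not]
  omega

theorem pvLt_asymm {a b : List Int} (h : pvLt a b = true) : pvLt b a = false := by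
  cases hba : pvLt b a
  · rfl
  · rw [pvLt_true] at h hba; omega

theorem pvLt_trans_neg {a b c : List Int} (h1 : pvLt a b = true) (h2 : pvLt c b = false) :
    pvLt c a = false := by
  have h2' : ¬ pvLt c b = true := by simp [h2]
  rw [pvLt_true] at h1 h2'
  cases hca : pvLt c a
  · rfl
  · rw [pvLt_true] at hca
    exfalso
    omega

theorem pvPairwise_insertBy (x : List Int) :
    ∀ (ys : List (List Int)), ys.Pairwise (fun a b => pvLt b a = false) →
      (PySem.List.insertBy pvLt x ys).Pairwise (fun a b => pvLt b a = false) := by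
  intro ys
  induction ys with
  | nil => intro _; simp [PySem.List.insertBy]
  | cons y ys ih =>
    intro hp
    rw [List.pairwise_cons] at hp
    obtain ⟨hy, hys⟩ := hp
    simp only [PySem.List.insertBy]
    by_cases hxy : pvLt x y = true
    · rw [if_pos hxy]
      refine List.pairwise_cons.mpr ⟨?_, List.pairwise_cons.mpr ⟨hy, hys⟩⟩
      intro z hz
      rcases List.mem_cons.mp hz with rfl | hz2
      · exact pvLt_asymm hxy
      · exact pvLt_trans_neg hxy (hy z hz2)
    · rw [if_neg hxy]
      refine List.pairwise_cons.mpr ⟨?_, ih hys⟩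
      intro z hz
      rcases (PySem.List.mem_insertBy pvLt x z ys).mp hz with rfl | hz2
      · exact Bool.eq_false_iff.mpr hxy
      · exact hy z hz2

theorem pvSorted2_pairwise (s : List (List Int)) :
    (PySem.List.sorted2 s (fun x => -(pvI x)) (fun x => pvJ x)).Pairwise pvRle := by
  have hfold : PySem.List.sorted2 s (fun x => -(pvI x)) (fun x => pvJ x) =
      s.foldl (fun acc x => PySem.List.insertBy pvLt x acc) [] := rfl
  rw [hfold]
  have haux : ∀ (l : List (List Int)) (acc : List (List Int)),
      acc.Pairwise (fun a b => pvLt b a = false) →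
      (l.foldl (fun acc x => PySem.List.insertBy pvLt x acc) acc).Pairwise
        (fun a b => pvLt b a = false) := by
    intro l
    induction l with
    | nil => intro acc h; simpa using h
    | cons x r ih => intro acc h; exact ih _ (pvPairwise_insertBy x acc h)
  refine (haux s [] List.Pairwise.nil).imp ?_
  intro a b hab
  have hab' : ¬ pvLt b a = true := by simp [hab]
  rw [pvLt_true] at hab'
  unfold pvRle
  omega

theorem pvM_le_iff (tl : List (List Int)) (x : List Int) :
    (((tl.filter (fun y => decide (pvI x < pvI y))).map (fun y => pvJ y)).foldl max 0 ≤ pvJ x)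
      ↔ pvQ tl x = true := by
  have hmax := PySem.List.le_foldl_max ((tl.filter (fun y => decide (pvI x < pvI y))).map (fun y => pvJ y)) 0
  constructor
  · intro hle
    simp only [pvQ, Bool.and_eq_true, decide_eq_true_eq, List.all_eq_true, Bool.or_eq_true]
    refine ⟨le_trans hmax.1 hle, ?_⟩
    intro y hy
    by_cases hiy : pvI x < pvI y
    · left
      have hmem : pvJ y ∈ (tl.filter (fun y => decide (pvI x < pvI y))).map (fun y => pvJ y) :=
        List.mem_map_of_mem (List.mem_filter.mpr ⟨hy, by simpa using hiy⟩)
      exact le_trans (hmax.2 _ hmem) hle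
    · right; omega
  · intro hq
    simp only [pvQ, Bool.and_eq_true, decide_eq_true_eq, List.all_eq_true, Bool.or_eq_true] at hq
    obtain ⟨hj0, hall⟩ := hq
    rcases PySem.List.foldl_max_mem ((tl.filter (fun y => decide (pvI x < pvI y))).map (fun y => pvJ y)) 0 with h0 | hmem
    · omega
    · obtain ⟨y, hy, hyj⟩ := List.mem_map.mp hmem
      obtain ⟨hytl, hfy⟩ := List.mem_filter.mp hy
      have hiy : pvI x < pvI y := by simpa using hfy
      rcases hall y hytl with hjl | hil <;> omega

theorem pvCountA_eq (temp : List Int) (F : List (List Int)) (hP : F.Pairwise pvRle) :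
    ∀ (r pre : List (List Int)), F = pre ++ r →
      pvCountA temp r ((pre.map pvJ).foldl max 0) = pvCountQ F temp r := by
  intro r
  induction r with
  | nil => intro pre _; simp [pvCountA, pvCountQ]
  | cons x rest ih =>
    intro pre hF
    have hpre_x : ∀ y ∈ pre, pvRle y x := fun y hy =>
      (List.pairwise_append.mp (hF ▸ hP)).2.2 y hy x (List.mem_cons_self)
    have hx_rest : ∀ y ∈ rest, pvRle x y :=
      fun y hy => (List.pairwise_cons.mp (List.pairwise_append.mp (hF ▸ hP)).2.1).1 y hy
    have hsv0 : (0 : Int) ≤ (pre.map pvJ).foldl max 0 := (PySem.List.le_foldl_max _ 0).1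
    have hpre_le : ∀ y ∈ pre, pvJ y ≤ (pre.map pvJ).foldl max 0 :=
      fun y hy => (PySem.List.le_foldl_max _ 0).2 _ (List.mem_map_of_mem hy)
    have hkey : ((pre.map pvJ).foldl max 0 ≤ pvJ x) ↔ pvQ F x = true := by
      constructor
      · intro hle
        simp only [pvQ, Bool.and_eq_true, decide_eq_true_eq, List.all_eq_true, Bool.or_eq_true]
        refine ⟨by omega, ?_⟩
        intro y hyF
        rw [hF] at hyF
        rcases List.mem_append.mp hyF with hy | hy
        · left; exact le_trans (hpre_le y hy) hle
        · rcases List.mem_cons.mp hy with rfl | hy2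
          · right; omega
          · have hr := hx_rest y hy2
            unfold pvRle at hr
            right; omega
      · intro hq
        simp only [pvQ, Bool.and_eq_true, decide_eq_true_eq, List.all_eq_true, Bool.or_eq_true] at hq
        obtain ⟨hj0, hall⟩ := hq
        rcases PySem.List.foldl_max_mem (pre.map pvJ) 0 with h0 | hmem
        · omega
        · obtain ⟨y, hy, hyj⟩ := List.mem_map.mp hmem
          have hymem : y ∈ F := by rw [hF]; exact List.mem_append.mpr (Or.inl hy)
          have hr := hpre_x y hy
          unfold pvRle at hr
          rcases hall y hymem with hjl | hil
          · omega
          · rcases hr with h1 | h2 <;> omega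
    simp only [pvCountA, pvCountQ]
    by_cases hsv : (pre.map pvJ).foldl max 0 ≤ pvJ x
    · rw [if_pos hsv]
      have hnew : ((pre ++ [x]).map pvJ).foldl max 0 = pvJ x := by
        rw [List.map_append, List.foldl_append]
        simp only [List.map_cons, List.map_nil, List.foldl_cons, List.foldl_nil]
        omega
      have hih := ih (pre ++ [x]) (by rw [hF, List.append_assoc]; rfl)
      rw [hnew] at hih
      rw [hih, hkey.mp hsv]
      by_cases hc : pvI temp + pvJ temp < pvI x + pvJ x <;> simp [hc]
    · rw [if_neg hsv]
      have hnew : ((pre ++ [x]).map pvJ).foldl max 0 = (pre.map pvJ).foldl max 0 := by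
        rw [List.map_append, List.foldl_append]
        simp only [List.map_cons, List.map_nil, List.foldl_cons, List.foldl_nil]
        omega
      have hih := ih (pre ++ [x]) (by rw [hF, List.append_assoc]; rfl)
      rw [hnew] at hih
      rw [hih]
      have hqx : pvQ F x = false := by
        cases heq : pvQ F x
        · rfl
        · exact absurd (hkey.mpr heq) hsv
      rw [hqx]
      simp

theorem pvQ_congr {F F' : List (List Int)} (h : ∀ y, y ∈ F ↔ y ∈ F') (x : List Int) :
    pvQ F x = pvQ F' x := by
  rw [Bool.eq_iff_iff]
  simp only [pvQ, Bool.and_eq_true, List.all_eq_true]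
  constructor
  · rintro ⟨h1, h2⟩; exact ⟨h1, fun y hy => h2 y ((h y).mpr hy)⟩
  · rintro ⟨h1, h2⟩; exact ⟨h1, fun y hy => h2 y ((h y).mp hy)⟩

theorem pvCountQ_F_congr {F F' : List (List Int)} (h : ∀ y, y ∈ F ↔ y ∈ F') (w : List Int) :
    ∀ l, pvCountQ F w l = pvCountQ F' w l := by
  intro l
  induction l with
  | nil => simp [pvCountQ]
  | cons x r ih => simp only [pvCountQ, pvQ_congr h x, ih]

theorem pvCountQ_perm (F : List (List Int)) (w : List Int) {l l' : List (List Int)}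
    (h : l.Perm l') : pvCountQ F w l = pvCountQ F w l' := by
  induction h with
  | nil => rfl
  | cons x h ih => simp only [pvCountQ, ih]
  | swap x y l => simp only [pvCountQ]; ring
  | trans h1 h2 ih1 ih2 => rw [ih1, ih2]

theorem pvB_loop (w : List Int) (others : List (List Int)) :
    ∀ (l : List (List Int)) (acc : Int),
      l.foldl (fun answer x =>
        let i := pvI x
        let j := pvJ x
        let m := ((others.filter (fun y => decide (i < pvI y))).map (fun y => pvJ y)).foldl max 0
        if m ≤ j ∧ pvI w + pvJ w < i + j then answer + 1 else answer) acc
      = acc + pvCountQ others w l := by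
  intro l
  induction l with
  | nil => intro acc; simp [pvCountQ]
  | cons x r ih =>
    intro acc
    simp only [List.foldl_cons, pvCountQ]
    rw [ih]
    have hm := pvM_le_iff others x
    by_cases h1 : pvQ others x = true
    · by_cases h2 : pvI w + pvJ w < pvI x + pvJ x
      · rw [if_pos ⟨hm.mpr h1, h2⟩, h1]
        simp only [Bool.true_and, decide_eq_true h2, if_pos]
        ring
      · rw [if_neg (by tauto), h1]
        simp [h2]
    · have hq : pvQ others x = false := Bool.eq_false_iff.mpr h1
      rw [if_neg (fun hc => h1 (hm.mp hc.1)), hq]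
      simp

-- ===== VERDICT (by name: the statement is the Claim_ definition above) =====
theorem solution_spec : Claim_equal_solution := by
  intro scores _hDom hPre
  obtain ⟨hne, _hH, _hT⟩ := hPre
  unfold Spec_solution
  cases scores with
  | nil => exact absurd rfl hne
  | cons hd tl =>
    simp only [solution, solution_alt, PySem.List.slice_from_one, List.tail_cons,
      PySem.List.pyGetD_zero_cons]
    have hperm := PySem.List.sorted2_perm tl (fun x => -(pvI x)) (fun x => pvJ x) false
    by_cases hdom : ∃ x ∈ tl, pvI hd < pvI x ∧ pvJ hd < pvJ x
    · obtain ⟨y, hy, hb⟩ := hdom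
      rw [pvLoopA_neg1 hd _ 0 1 ⟨y, hperm.mem_iff.mpr hy, hb⟩]
      rw [if_pos]
      simp only [List.any_eq_true, Bool.and_eq_true, decide_eq_true_eq]
      exact ⟨y, hy, hb⟩
    · have hno : ∀ x ∈ PySem.List.sorted2 tl (fun x => -(pvI x)) (fun x => pvJ x),
          ¬(pvI hd < pvI x ∧ pvJ hd < pvJ x) :=
        fun x hx hc => hdom ⟨x, hperm.mem_iff.mp hx, hc⟩
      rw [pvLoopA_count hd _ 0 1 hno]
      rw [if_neg (by
        simp only [List.any_eq_true, Bool.and_eq_true, decide_eq_true_eq]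
        exact hdom)]
      rw [pvB_loop hd tl tl 1]
      have h1 := pvCountA_eq hd _ (pvSorted2_pairwise tl)
        (PySem.List.sorted2 tl (fun x => -(pvI x)) (fun x => pvJ x)) [] rfl
      simp only [List.map_nil, List.foldl_nil] at h1
      rw [h1]
      rw [pvCountQ_F_congr (fun y => hperm.mem_iff) hd
        (PySem.List.sorted2 tl (fun x => -(pvI x)) (fun x => pvJ x))]
      rw [pvCountQ_perm tl hd hperm]
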